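-- pv_equiv track=rewrite | github.com/sshpiz/french_conjugato | stanza_post.py | make_gap_fill_sentence
-- ===== SOURCE A (Python) =====
-- def make_gap_fill_sentence(sentence, analysis, blank_pronoun=True, blank_aux=True, blank_verb=True):
--     """
--     Replace pronoun, aux, and verb in sentence with placeholder tokens.
--     """
--
--     replacements = []
--
--     if blank_pronoun and analysis.get('pronoun_start') is not None:
--         replacements.append((analysis['pronoun_start'], analysis['pronoun_end'], '[PRONOUN]'))
--
--     if blank_aux and analysis.get('aux_start') is not None:
--         replacements.append((analysis['aux_start'], analysis['aux_end'], '[AUX]'))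
--
--     if blank_verb and analysis.get('conjugated_verb_start') is not None:
--         replacements.append((analysis['conjugated_verb_start'], analysis['conjugated_verb_end'], '[VERB]'))
--
--     # Sort in reverse order so we don’t mess up offsets
--     replacements.sort(reverse=True)
--
--     s = sentence
--     for start, end, token in replacements:
--         s = s[:start] + token + s[end:]
--
--     return s
-- ===== SOURCE B (Python) =====
-- def make_gap_fill_sentence(sentence, analysis, blank_pronoun=True, blank_aux=True, blank_verb=True):
--     """
--     Replace pronoun, aux, and verb in sentence with placeholder tokens.
--     Forward single pass: collect spans, sort ascending, join segments with a cursor.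
--     """
--     spans = []
--     for flag, start_key, end_key, token in (
--         (blank_pronoun, 'pronoun_start', 'pronoun_end', '[PRONOUN]'),
--         (blank_aux, 'aux_start', 'aux_end', '[AUX]'),
--         (blank_verb, 'conjugated_verb_start', 'conjugated_verb_end', '[VERB]'),
--     ):
--         if flag and analysis.get(start_key) is not None:
--             spans.append((analysis[start_key], analysis[end_key], token))
--
--     spans.sort()
--
--     pieces = []
--     cursor = 0
--     for start, end, token in spans:
--         pieces.append(sentence[cursor:start])
--         pieces.append(token)
--         cursor = end
--     pieces.append(sentence[cursor:])
--     return ''.join(pieces)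
-- ===== Notes on version B (the rewrite author's own statement) =====
-- stated objective: simpler
-- what changed: B collects the same (start, end, token) spans but sorts them ascending and builds the result in one forward pass with a cursor and a piece list over the original string, instead of A's reverse sort and repeated re-splicing of a mutating copy.
import Mathlib
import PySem

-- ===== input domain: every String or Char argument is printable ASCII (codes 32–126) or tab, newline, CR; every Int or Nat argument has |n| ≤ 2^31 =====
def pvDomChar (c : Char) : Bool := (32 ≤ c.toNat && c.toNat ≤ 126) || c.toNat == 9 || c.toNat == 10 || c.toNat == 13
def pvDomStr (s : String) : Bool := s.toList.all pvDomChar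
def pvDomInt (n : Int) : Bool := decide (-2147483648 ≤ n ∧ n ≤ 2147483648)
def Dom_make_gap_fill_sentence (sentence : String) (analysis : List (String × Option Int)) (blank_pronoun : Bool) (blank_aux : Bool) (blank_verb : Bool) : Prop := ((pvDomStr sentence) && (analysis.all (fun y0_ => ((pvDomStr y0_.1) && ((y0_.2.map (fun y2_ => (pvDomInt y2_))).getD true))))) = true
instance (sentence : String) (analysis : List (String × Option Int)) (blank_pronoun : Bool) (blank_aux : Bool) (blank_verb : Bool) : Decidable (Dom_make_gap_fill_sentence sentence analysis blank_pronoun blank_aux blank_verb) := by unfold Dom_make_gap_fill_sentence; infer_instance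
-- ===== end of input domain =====

-- B replaces A's reverse-order re-splicing of a mutating string copy by one forward pass that
-- joins segments of the ORIGINAL string with a cursor (objective: simpler).

-- ===== PORT A =====
-- analysis.get(k): a missing key reads as None
def pvGetOpt (d : List (String × Option Int)) (k : String) : Option Int :=
  (PySem.Dict.get? (PySem.Dict.mk d) k).getD none

def pvActive (d : List (String × Option Int)) (k : String) : Bool :=
  (pvGetOpt d k).isSome

-- analysis[k] read as an int; the KeyError / None-valued cases never occur under Pre_
def pvVal (d : List (String × Option Int)) (k : String) : Int :=
  (pvGetOpt d k).getD 0

def make_gap_fill_sentence (sentence : String) (analysis : List (String × Option Int)) (blank_pronoun : Bool) (blank_aux : Bool) (blank_verb : Bool) : String :=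
  let replacements : List (Int × Int × String) :=
    (if blank_pronoun && pvActive analysis "pronoun_start" then
        [(pvVal analysis "pronoun_start", pvVal analysis "pronoun_end", "[PRONOUN]")] else []) ++
    (if blank_aux && pvActive analysis "aux_start" then
        [(pvVal analysis "aux_start", pvVal analysis "aux_end", "[AUX]")] else []) ++
    (if blank_verb && pvActive analysis "conjugated_verb_start" then
        [(pvVal analysis "conjugated_verb_start", pvVal analysis "conjugated_verb_end", "[VERB]")] else [])
  -- replacements.sort(reverse=True): Python compares the (start, end, token) tuples; the token
  -- tie-break is unreachable under Pre_ (distinct starts), so the key is the (start, end) prefix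
  let replacements := PySem.List.sorted2 replacements (fun r => r.1) (fun r => r.2.1) true
  let s := replacements.foldl
    (fun s r => PySem.List.slice s none (some r.1) ++ r.2.2.toList ++ PySem.List.slice s (some r.2.1) none)
    sentence.toList
  String.ofList s

-- ===== PORT B =====
def make_gap_fill_sentence_alt (sentence : String) (analysis : List (String × Option Int)) (blank_pronoun : Bool) (blank_aux : Bool) (blank_verb : Bool) : String :=
  let cs := sentence.toList
  let spans : List (Int × Int × String) :=
    ([(blank_pronoun, "pronoun_start", "pronoun_end", "[PRONOUN]"),
      (blank_aux, "aux_start", "aux_end", "[AUX]"),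
      (blank_verb, "conjugated_verb_start", "conjugated_verb_end", "[VERB]")]
      : List (Bool × String × String × String)).foldl
      (fun acc f =>
        if f.1 && pvActive analysis f.2.1 then
          acc ++ [(pvVal analysis f.2.1, pvVal analysis f.2.2.1, f.2.2.2)]
        else acc) []
  -- spans.sort(): ascending; token tie-break unreachable under Pre_ (distinct starts)
  let spans := PySem.List.sorted2 spans (fun r => r.1) (fun r => r.2.1) false
  let st := spans.foldl
    (fun st r => (r.2.1, st.2 ++ [PySem.List.slice cs (some st.1) (some r.1), r.2.2.toList]))
    ((0 : Int), ([] : List (List Char)))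
  String.ofList (st.2 ++ [PySem.List.slice cs (some st.1) none]).flatten

-- ===== PRECONDITION & SPEC =====
def pvSpanOK (analysis : List (String × Option Int)) (flag : Bool) (sk ek : String) (n : Int) : Prop :=
  (flag && pvActive analysis sk) = true →
    ((pvGetOpt analysis ek).isSome ∧ 0 ≤ pvVal analysis sk ∧
      pvVal analysis sk ≤ pvVal analysis ek ∧ pvVal analysis ek ≤ n)

def pvDisj (s1 e1 s2 e2 : Int) : Prop := (s1 < s2 ∧ e1 ≤ s2) ∨ (s2 < s1 ∧ e2 ≤ s1)

-- Pre_ excludes the degenerate analyses: a selected span whose end offset is a missing key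
-- (A raises KeyError) or None, offsets that are negative or past the end of the sentence, and
-- selected spans that overlap or share a start — there A's value (when it returns one) is an
-- accident of Python's negative/None slicing and of the reverse re-splice order.
def Pre_make_gap_fill_sentence (sentence : String) (analysis : List (String × Option Int)) (blank_pronoun : Bool) (blank_aux : Bool) (blank_verb : Bool) : Prop :=
  pvSpanOK analysis blank_pronoun "pronoun_start" "pronoun_end" (PySem.Str.len sentence) ∧
  pvSpanOK analysis blank_aux "aux_start" "aux_end" (PySem.Str.len sentence) ∧
  pvSpanOK analysis blank_verb "conjugated_verb_start" "conjugated_verb_end" (PySem.Str.len sentence) ∧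
  ((blank_pronoun && pvActive analysis "pronoun_start") = true →
    (blank_aux && pvActive analysis "aux_start") = true →
    pvDisj (pvVal analysis "pronoun_start") (pvVal analysis "pronoun_end")
           (pvVal analysis "aux_start") (pvVal analysis "aux_end")) ∧
  ((blank_pronoun && pvActive analysis "pronoun_start") = true →
    (blank_verb && pvActive analysis "conjugated_verb_start") = true →
    pvDisj (pvVal analysis "pronoun_start") (pvVal analysis "pronoun_end")
           (pvVal analysis "conjugated_verb_start") (pvVal analysis "conjugated_verb_end")) ∧
  ((blank_aux && pvActive analysis "aux_start") = true →
    (blank_verb && pvActive analysis "conjugated_verb_start") = true →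
    pvDisj (pvVal analysis "aux_start") (pvVal analysis "aux_end")
           (pvVal analysis "conjugated_verb_start") (pvVal analysis "conjugated_verb_end"))

instance (sentence : String) (analysis : List (String × Option Int)) (blank_pronoun : Bool) (blank_aux : Bool) (blank_verb : Bool) : Decidable (Pre_make_gap_fill_sentence sentence analysis blank_pronoun blank_aux blank_verb) := by
  unfold Pre_make_gap_fill_sentence pvSpanOK pvDisj
  refine @instDecidableAnd _ _ ?_ (@instDecidableAnd _ _ ?_ (@instDecidableAnd _ _ ?_ (@instDecidableAnd _ _ ?_ (@instDecidableAnd _ _ ?_ ?_)))) <;> infer_instance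

def pvWitness_make_gap_fill_sentence : String × (List (String × Option Int)) × Bool × Bool × Bool :=
  ("je mange", [("pronoun_start", some 0), ("pronoun_end", some 2),
                ("conjugated_verb_start", some 3), ("conjugated_verb_end", some 8)], true, true, true)

def Spec_make_gap_fill_sentence (sentence : String) (analysis : List (String × Option Int)) (blank_pronoun : Bool) (blank_aux : Bool) (blank_verb : Bool) (out : String) : Prop := out = make_gap_fill_sentence_alt sentence analysis blank_pronoun blank_aux blank_verb
instance (sentence : String) (analysis : List (String × Option Int)) (blank_pronoun : Bool) (blank_aux : Bool) (blank_verb : Bool) (out : String) : Decidable (Spec_make_gap_fill_sentence sentence analysis blank_pronoun blank_aux blank_verb out) := by unfold Spec_make_gap_fill_sentence; infer_instance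

-- ===== CLAIM (what is proved, stated in full; the proofs are below) =====
def Claim_equal_make_gap_fill_sentence : Prop := ∀ (sentence : String) (analysis : List (String × Option Int)) (blank_pronoun : Bool) (blank_aux : Bool) (blank_verb : Bool), Dom_make_gap_fill_sentence sentence analysis blank_pronoun blank_aux blank_verb → Pre_make_gap_fill_sentence sentence analysis blank_pronoun blank_aux blank_verb → Spec_make_gap_fill_sentence sentence analysis blank_pronoun blank_aux blank_verb (make_gap_fill_sentence sentence analysis blank_pronoun blank_aux blank_verb)

-- ===== LEMMAS AND PROOFS =====

-- The common shape both ports reach: the pieces of the original string between/around the spans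
def pvBuild (cs : List Char) : Int → List (Int × Int × String) → List Char
  | c, [] => PySem.List.slice cs (some c) none
  | c, (s, e, t) :: r => PySem.List.slice cs (some c) (some s) ++ t.toList ++ pvBuild cs e r

-- well-formed span chain: c ≤ s ≤ e ≤ n, links sorted and disjoint
def pvOk (n : Int) : Int → List (Int × Int × String) → Prop
  | _, [] => True
  | c, (s, e, _) :: r => c ≤ s ∧ s ≤ e ∧ e ≤ n ∧ pvOk n e r

theorem pvB_foldl (cs : List Char) (spans : List (Int × Int × String)) : ∀ (c : Int) (ps : List (List Char)),
    ((spans.foldl (fun st r => (r.2.1, st.2 ++ [PySem.List.slice cs (some st.1) (some r.1), r.2.2.toList])) (c, ps)).2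
      ++ [PySem.List.slice cs (some ((spans.foldl (fun st r => (r.2.1, st.2 ++ [PySem.List.slice cs (some st.1) (some r.1), r.2.2.toList])) (c, ps)).1)) none]).flatten
    = ps.flatten ++ pvBuild cs c spans := by
  induction spans with
  | nil => intro c ps; simp [pvBuild]
  | cons hd tl ih =>
      intro c ps
      obtain ⟨s, e, t⟩ := hd
      simp only [List.foldl_cons]
      rw [ih]
      simp [pvBuild]

theorem pvA_foldr (cs : List Char) (spans : List (Int × Int × String)) : ∀ (c : Int), 0 ≤ c → pvOk (cs.length : Int) c spans →
    spans.foldr (fun r s => PySem.List.slice s none (some r.1) ++ r.2.2.toList ++ PySem.List.slice s (some r.2.1) none) cs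
    = PySem.List.slice cs none (some c) ++ pvBuild cs c spans := by
  induction spans with
  | nil =>
      intro c h0 _
      simp only [List.foldr_nil, pvBuild]
      rw [PySem.List.slice_to cs h0, PySem.List.slice_from cs h0]
      exact (List.take_append_drop _ _).symm
  | cons hd tl ih =>
      intro c h0 hok
      obtain ⟨s, e, t⟩ := hd
      obtain ⟨hcs, hse, hen, hok'⟩ := hok
      have h0s : (0:Int) ≤ s := by omega
      have h0e : (0:Int) ≤ e := by omega
      simp only [List.foldr_cons]
      rw [ih e h0e hok']
      rw [PySem.List.slice_to cs h0e]
      have hlen : (cs.take e.toNat).length = e.toNat := by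
        simp [List.length_take]; omega
      simp only [pvBuild]
      rw [PySem.List.slice_to _ h0s, PySem.List.slice_from _ h0e,
          PySem.List.slice_to _ h0, PySem.List.slice_toNat cs h0 h0s]
      rw [List.take_append_of_le_length (by omega), List.take_take,
          List.drop_left' hlen]
      have hmin : min s.toNat e.toNat = s.toNat := by omega
      rw [hmin]
      have hsplit : cs.take s.toNat = cs.take c.toNat ++ (cs.drop c.toNat).take (s.toNat - c.toNat) := by
        rw [← List.take_add]; congr 1; omega
      rw [hsplit]
      simp [List.append_assoc]

theorem pvInsertBy_congr {α : Type} (b1 b2 : α → α → Bool) (x : α) : ∀ (ys : List α),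
    (∀ y ∈ ys, b1 x y = b2 x y) → PySem.List.insertBy b1 x ys = PySem.List.insertBy b2 x ys := by
  intro ys
  induction ys with
  | nil => intro _; rfl
  | cons y ys ih =>
      intro h
      have hy : b1 x y = b2 x y := h y (by simp)
      simp only [PySem.List.insertBy]
      rw [hy]
      by_cases hb : b2 x y = true
      · simp [hb]
      · simp only [Bool.not_eq_true] at hb
        simp [hb, ih (fun z hz => h z (by simp [hz]))]

theorem pvFoldl_insertBy_congr {α : Type} (b1 b2 : α → α → Bool) (Q : α → Prop)
    (hb : ∀ a b, Q a → Q b → b1 a b = b2 a b) :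
    ∀ (xs : List α) (acc : List α), (∀ x ∈ xs, Q x) → (∀ x ∈ acc, Q x) →
      xs.foldl (fun acc x => PySem.List.insertBy b1 x acc) acc
      = xs.foldl (fun acc x => PySem.List.insertBy b2 x acc) acc := by
  intro xs
  induction xs with
  | nil => intro acc _ _; rfl
  | cons x xs ih =>
      intro acc hxs hacc
      simp only [List.foldl_cons]
      have hx : Q x := hxs x (by simp)
      rw [pvInsertBy_congr b1 b2 x acc (fun y hy => hb x y hx (hacc y hy))]
      exact ih _ (fun z hz => hxs z (by simp [hz]))
        (fun z hz => by
          rcases (PySem.List.mem_insertBy b2 x z acc).mp hz with h | h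
          · exact h ▸ hx
          · exact hacc z h)

theorem pvSorted2_eq_sorted (xs : List (Int × Int × String)) (rev : Bool)
    (H : ∀ a ∈ xs, ∀ b ∈ xs, a.1 = b.1 → a.2.1 = b.2.1) :
    PySem.List.sorted2 xs (fun r => r.1) (fun r => r.2.1) rev
    = PySem.List.sorted xs (fun r => r.1) rev := by
  have hagree : ∀ a b, a ∈ xs → b ∈ xs →
      (decide (a.1 < b.1) || (!decide (b.1 < a.1) && decide (a.2.1 < b.2.1))) = decide (a.1 < b.1) := by
    intro a b ha hb
    rcases lt_trichotomy a.1 b.1 with h | h | h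
    · simp [h]
    · have h2 := H a ha b hb h
      simp [h, h2]
    · simp [h, not_lt_of_gt h]
  cases rev with
  | false =>
      rw [PySem.List.sorted_eq_foldl_insertBy]
      show List.foldl (fun acc x => PySem.List.insertBy _ x acc) [] xs = _
      exact pvFoldl_insertBy_congr _ _ (· ∈ xs)
        (fun a b ha hb => hagree a b ha hb) xs [] (fun _ h => h) (by simp)
  | true =>
      rw [PySem.List.sorted_rev_eq_foldl_insertBy]
      show List.foldl (fun acc x => PySem.List.insertBy _ x acc) [] xs = _
      exact pvFoldl_insertBy_congr _ _ (· ∈ xs)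
        (fun a b ha hb => hagree b a hb ha) xs [] (fun _ h => h) (by simp)

theorem pvOk_of (n : Int) : ∀ (spans : List (Int × Int × String)),
    List.Pairwise (fun (a b : Int × Int × String) => a.2.1 ≤ b.1) spans →
    (∀ x ∈ spans, 0 ≤ x.1 ∧ x.1 ≤ x.2.1 ∧ x.2.1 ≤ n) →
    ∀ c, (∀ x ∈ spans, c ≤ x.1) → pvOk n c spans := by
  intro spans
  induction spans with
  | nil => intro _ _ c _; trivial
  | cons hd tl ih =>
      intro hpair hbnd c hc
      obtain ⟨s, e, t⟩ := hd
      rw [List.pairwise_cons] at hpair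
      have hb := hbnd (s, e, t) (by simp)
      refine ⟨hc (s, e, t) (by simp), by exact_mod_cast hb.2.1, by exact_mod_cast hb.2.2, ?_⟩
      exact ih hpair.2 (fun x hx => hbnd x (by simp [hx])) e
        (fun x hx => hpair.1 x hx)

set_option maxHeartbeats 1600000 in
theorem pvMain (sentence : String) (analysis : List (String × Option Int))
    (blank_pronoun blank_aux blank_verb : Bool)
    (hpre : Pre_make_gap_fill_sentence sentence analysis blank_pronoun blank_aux blank_verb) :
    make_gap_fill_sentence sentence analysis blank_pronoun blank_aux blank_verb
    = make_gap_fill_sentence_alt sentence analysis blank_pronoun blank_aux blank_verb := by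
  obtain ⟨h1, h2, h3, h12, h13, h23⟩ := hpre
  rw [PySem.Str.len_eq] at h1 h2 h3
  unfold make_gap_fill_sentence make_gap_fill_sentence_alt
  simp only [List.foldl_cons, List.foldl_nil]
  set cs : List Char := sentence.toList with hcs
  set p1 : Int × Int × String := (pvVal analysis "pronoun_start", pvVal analysis "pronoun_end", "[PRONOUN]") with hp1
  set p2 : Int × Int × String := (pvVal analysis "aux_start", pvVal analysis "aux_end", "[AUX]") with hp2
  set p3 : Int × Int × String := (pvVal analysis "conjugated_verb_start", pvVal analysis "conjugated_verb_end", "[VERB]") with hp3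
  set c1 : Bool := blank_pronoun && pvActive analysis "pronoun_start" with hc1
  set c2 : Bool := blank_aux && pvActive analysis "aux_start" with hc2
  set c3 : Bool := blank_verb && pvActive analysis "conjugated_verb_start" with hc3
  set repl : List (Int × Int × String) :=
    (if c1 then [p1] else []) ++ (if c2 then [p2] else []) ++ (if c3 then [p3] else []) with hrepl
  have htable : (if c3 then (if c2 then (if c1 then ([] : List (Int × Int × String)) ++ [p1] else []) ++ [p2]
        else (if c1 then ([] : List (Int × Int × String)) ++ [p1] else [])) ++ [p3]
      else (if c2 then (if c1 then ([] : List (Int × Int × String)) ++ [p1] else []) ++ [p2]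
        else (if c1 then ([] : List (Int × Int × String)) ++ [p1] else []))) = repl := by
    rw [hrepl]; split_ifs <;> simp
  rw [htable]
  have hmem : ∀ x ∈ repl, (c1 = true ∧ x = p1) ∨ (c2 = true ∧ x = p2) ∨ (c3 = true ∧ x = p3) := by
    intro x hx
    rw [hrepl] at hx
    simp only [List.mem_append] at hx
    rcases hx with (hx | hx) | hx
    · by_cases h : c1 = true
      · simp [h] at hx; exact Or.inl ⟨h, hx⟩
      · simp [h] at hx
    · by_cases h : c2 = true
      · simp [h] at hx; exact Or.inr (Or.inl ⟨h, hx⟩)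
      · simp [h] at hx
    · by_cases h : c3 = true
      · simp [h] at hx; exact Or.inr (Or.inr ⟨h, hx⟩)
      · simp [h] at hx
  have HBnd : ∀ x ∈ repl, 0 ≤ x.1 ∧ x.1 ≤ x.2.1 ∧ x.2.1 ≤ (cs.length : Int) := by
    intro x hx
    rcases hmem x hx with ⟨hc, hx⟩ | ⟨hc, hx⟩ | ⟨hc, hx⟩
    · have := h1 hc; subst hx; exact ⟨this.2.1, this.2.2.1, this.2.2.2⟩
    · have := h2 hc; subst hx; exact ⟨this.2.1, this.2.2.1, this.2.2.2⟩
    · have := h3 hc; subst hx; exact ⟨this.2.1, this.2.2.1, this.2.2.2⟩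
  have HInj : ∀ a ∈ repl, ∀ b ∈ repl, a.1 = b.1 → a = b := by
    intro a ha b hb hab
    rcases hmem a ha with ⟨hca, hea⟩ | ⟨hca, hea⟩ | ⟨hca, hea⟩ <;>
      rcases hmem b hb with ⟨hcb, heb⟩ | ⟨hcb, heb⟩ | ⟨hcb, heb⟩ <;>
      subst hea <;> subst heb <;> try rfl
    · rcases h12 hca hcb with h | h <;> (exfalso; simp only [hp1, hp2] at hab; omega)
    · rcases h13 hca hcb with h | h <;> (exfalso; simp only [hp1, hp3] at hab; omega)
    · rcases h12 hcb hca with h | h <;> (exfalso; simp only [hp1, hp2] at hab; omega)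
    · rcases h23 hca hcb with h | h <;> (exfalso; simp only [hp2, hp3] at hab; omega)
    · rcases h13 hcb hca with h | h <;> (exfalso; simp only [hp1, hp3] at hab; omega)
    · rcases h23 hcb hca with h | h <;> (exfalso; simp only [hp2, hp3] at hab; omega)
  have HD : ∀ a ∈ repl, ∀ b ∈ repl, a.1 < b.1 → a.2.1 ≤ b.1 := by
    intro a ha b hb hab
    rcases hmem a ha with ⟨hca, hea⟩ | ⟨hca, hea⟩ | ⟨hca, hea⟩ <;>
      rcases hmem b hb with ⟨hcb, heb⟩ | ⟨hcb, heb⟩ | ⟨hcb, heb⟩ <;>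
      subst hea <;> subst heb <;> try (exfalso; exact lt_irrefl _ hab)
    · rcases h12 hca hcb with h | h <;> (simp only [hp1, hp2] at hab ⊢; omega)
    · rcases h13 hca hcb with h | h <;> (simp only [hp1, hp3] at hab ⊢; omega)
    · rcases h12 hcb hca with h | h <;> (simp only [hp1, hp2] at hab ⊢; omega)
    · rcases h23 hca hcb with h | h <;> (simp only [hp2, hp3] at hab ⊢; omega)
    · rcases h13 hcb hca with h | h <;> (simp only [hp1, hp3] at hab ⊢; omega)
    · rcases h23 hcb hca with h | h <;> (simp only [hp2, hp3] at hab ⊢; omega)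
  have HNodup : repl.Nodup := by
    have t12 : p1 ≠ p2 := by simp [hp1, hp2]
    have t13 : p1 ≠ p3 := by simp [hp1, hp3]
    have t23 : p2 ≠ p3 := by simp [hp2, hp3]
    rw [hrepl]
    split_ifs <;> simp [List.nodup_cons, t12, t13, t23]
  have H : ∀ a ∈ repl, ∀ b ∈ repl, a.1 = b.1 → a.2.1 = b.2.1 := by
    intro a ha b hb hab
    rw [HInj a ha b hb hab]
  -- name the ascending arrangement
  set asc := PySem.List.sorted repl (fun r => r.1) false with hasc
  have hperm : asc.Perm repl := PySem.List.sorted_perm repl _ false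
  have hmemasc : ∀ {x}, x ∈ asc → x ∈ repl := fun h => hperm.mem_iff.mp h
  have hpair_le : asc.Pairwise (fun a b => a.1 ≤ b.1) := PySem.List.sorted_pairwise repl _
  have hnodupasc : asc.Nodup := hperm.symm.nodup HNodup
  have hlt : asc.Pairwise (fun a b => a.1 < b.1) :=
    (hpair_le.and hnodupasc).imp_of_mem (by
      intro a b ha hb h
      exact lt_of_le_of_ne h.1 (fun heq => h.2 (HInj a (hmemasc ha) b (hmemasc hb) heq)))
  have hchain : asc.Pairwise (fun a b => a.2.1 ≤ b.1) :=
    hlt.imp_of_mem (fun ha hb h => HD _ (hmemasc ha) _ (hmemasc hb) h)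
  have hok : pvOk (cs.length : Int) 0 asc :=
    pvOk_of _ asc hchain (fun x hx => HBnd x (hmemasc hx)) 0 (fun x hx => (HBnd x (hmemasc hx)).1)
  have hdesc : PySem.List.sorted repl (fun r => r.1) true = asc.reverse :=
    PySem.List.sorted_rev_eq_of_perm_of_pairwise_gt repl asc.reverse _
      (asc.reverse_perm.trans hperm) (List.pairwise_reverse.mpr hlt)
  rw [pvSorted2_eq_sorted repl true H, pvSorted2_eq_sorted repl false H, hdesc,
      List.foldl_reverse]
  rw [pvA_foldr cs asc 0 le_rfl hok]
  rw [← hasc]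
  rw [pvB_foldl cs asc 0 []]
  rw [PySem.List.slice_to cs (le_refl 0)]
  simp

-- ===== VERDICT (by name: the statement is the Claim_ definition above) =====
theorem make_gap_fill_sentence_spec : Claim_equal_make_gap_fill_sentence := by
  intro sentence analysis blank_pronoun blank_aux blank_verb _ hpre
  exact pvMain sentence analysis blank_pronoun blank_aux blank_verb hpre
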